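-- pv_equiv track=rewrite | github.com/marcalph/tdv | fb/slow_sums.py | getTotalTime
-- ===== SOURCE A (Python) =====
-- def getTotalTime(arr):
--   # Write your code here
--   arr.sort()
--   run_pen = 0
--   cur_pen = 0
--   while len(arr)>1:
--     cur_pen = arr.pop()+arr.pop()
--     arr.append(cur_pen)
--     run_pen+=cur_pen
--   return run_pen
-- ===== SOURCE B (Python) =====
-- def getTotalTime(arr):
--     # Each sorted element a[i] is absorbed into the running merge once and then
--     # carried through every later merge: it is counted once per merge from its
--     # own onward, i.e. i times plus once more for every element except the top.
--     s = sorted(arr)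
--     return sum(i * x for i, x in enumerate(s)) + sum(s[:-1])
-- ===== Notes on version B (the rewrite author's own statement) =====
-- stated objective: alternative
-- what changed: Replaces the repeated pop-pop-append merge loop with a closed-form weighted sum over the sorted list, computed in one pass; equivalence is about the return value only (A collapses arr in place, B leaves it unchanged).
import Mathlib
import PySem

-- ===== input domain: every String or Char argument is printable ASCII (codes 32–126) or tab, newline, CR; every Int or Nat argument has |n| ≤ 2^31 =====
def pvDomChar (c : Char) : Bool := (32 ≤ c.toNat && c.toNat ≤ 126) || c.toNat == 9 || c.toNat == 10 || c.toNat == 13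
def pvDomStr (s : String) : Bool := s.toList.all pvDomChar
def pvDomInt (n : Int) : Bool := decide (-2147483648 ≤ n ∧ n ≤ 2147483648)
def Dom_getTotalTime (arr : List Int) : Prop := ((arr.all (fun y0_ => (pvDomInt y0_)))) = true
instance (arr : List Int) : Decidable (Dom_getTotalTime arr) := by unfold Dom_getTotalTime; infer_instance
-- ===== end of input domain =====

-- B replaces A's pop/pop/append merge loop by a single weighted sum over the sorted
-- list; equality proved for the RETURN value only (A collapses arr in place to one
-- element, B does not mutate its argument; the Lean ports are pure).

-- ===== PORT A =====
-- while len(arr) > 1: cur = arr.pop() + arr.pop(); arr.append(cur); run += cur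
def getTotalTimeLoop (arr : List Int) (run_pen : Int) : Int :=
  if h : 1 < arr.length then
    have hne : arr ≠ [] := by intro he; simp [he] at h
    let x := arr.getLast hne                    -- first arr.pop()
    let arr1 := arr.dropLast
    have hne1 : arr1 ≠ [] := by
      intro he
      have := arr.length_dropLast
      simp [arr1] at he
      simp [he] at this
      omega
    let y := arr1.getLast hne1                  -- second arr.pop()
    let arr2 := arr1.dropLast
    let cur := x + y
    getTotalTimeLoop (arr2 ++ [cur]) (run_pen + cur)   -- arr.append(cur)
  else run_pen
termination_by arr.length
decreasing_by
  have h1 := arr.length_dropLast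
  have h2 := arr.dropLast.length_dropLast
  simp only [List.length_append, List.length_cons, List.length_nil]
  omega

def getTotalTime (arr : List Int) : Int :=
  let arr := PySem.List.sorted arr (fun x => x) false   -- arr.sort()
  getTotalTimeLoop arr 0                                -- run_pen = 0; loop

-- ===== PORT B =====
def getTotalTime_alt (arr : List Int) : Int :=
  let s := PySem.List.sorted arr (fun x => x) false     -- s = sorted(arr)
  -- sum(i * x for i, x in enumerate(s)) + sum(s[:-1])
  ((PySem.List.enumerate s).foldl (fun acc p => acc + p.1 * p.2) 0)
    + (PySem.List.slice s none (some (-1))).sum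

-- ===== PRECONDITION & SPEC =====
def Spec_getTotalTime (arr : List Int) (out : Int) : Prop := out = getTotalTime_alt arr
instance (arr : List Int) (out : Int) : Decidable (Spec_getTotalTime arr out) := by unfold Spec_getTotalTime; infer_instance

-- ===== CLAIM (what is proved, stated in full; the proofs are below) =====
def Claim_equal_getTotalTime : Prop := ∀ (arr : List Int), Dom_getTotalTime arr → Spec_getTotalTime arr (getTotalTime arr)

-- ===== LEMMAS AND PROOFS =====

-- weighted sum: pvW l = Σ_i (i+1) * l_i, in head-recursive form
def pvW : List Int → Int
  | [] => 0
  | a :: t => a + t.sum + pvW t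

theorem pvW_append_singleton (u : List Int) (v : Int) :
    pvW (u ++ [v]) = pvW u + v * (u.length + 1) := by
  induction u with
  | nil => simp [pvW]
  | cons a t ih =>
      simp only [List.cons_append, pvW, ih, List.sum_append, List.sum_cons, List.sum_nil,
        List.length_cons]
      push_cast
      ring

theorem loop_closed (arr : List Int) (run : Int) :
    getTotalTimeLoop arr run = run + pvW arr - arr.getLastD 0 := by
  induction arr, run using getTotalTimeLoop.induct with
  | case1 arr run h hne x arr1 hne1 y arr2 cur ih =>
      rw [getTotalTimeLoop]
      simp only [dif_pos h]
      rw [ih]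
      have e1 : arr1 ++ [x] = arr := List.dropLast_append_getLast hne
      have e2 : arr2 ++ [y] = arr1 := List.dropLast_append_getLast hne1
      have earr : arr = arr2 ++ [y, x] := by
        rw [← e1, ← e2]; simp
      rw [earr]
      have hyx : arr2 ++ [y, x] = (arr2 ++ [y]) ++ [x] := by simp
      rw [hyx, pvW_append_singleton (arr2 ++ [y]) x, pvW_append_singleton arr2 y,
        pvW_append_singleton arr2 (x + y)]
      simp only [List.getLastD_concat, List.length_append, List.length_cons, List.length_nil]
      push_cast
      ring
  | case2 arr run h =>
      rw [getTotalTimeLoop]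
      simp only [dif_neg h]
      interval_cases harr : arr.length
      · have : arr = [] := List.length_eq_zero_iff.mp harr
        simp [this, pvW]
      · obtain ⟨a, ha⟩ := List.length_eq_one_iff.mp harr
        simp [ha, pvW]

-- Σ (k+j) * x_j over enumerate s k, folded left
theorem enum_fold (s : List Int) (k acc : Int) :
    (PySem.List.enumerate s k).foldl (fun acc p => acc + p.1 * p.2) acc
      = acc + k * s.sum + (pvW s - s.sum) := by
  induction s generalizing k acc with
  | nil => simp [PySem.List.enumerate_nil, pvW]
  | cons a t ih =>
      rw [PySem.List.enumerate_cons]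
      simp only [List.foldl_cons, ih, List.sum_cons, pvW]
      ring

theorem sum_dropLast (s : List Int) : s.dropLast.sum = s.sum - s.getLastD 0 := by
  induction s with
  | nil => simp
  | cons a t ih =>
      cases t with
      | nil => simp
      | cons b u =>
          simp only [List.dropLast_cons₂, List.sum_cons, ih, List.getLastD_cons]
          ring

-- ===== VERDICT (by name: the statement is the Claim_ definition above) =====
theorem getTotalTime_spec : Claim_equal_getTotalTime := by
  intro arr _
  unfold Spec_getTotalTime getTotalTime getTotalTime_alt
  simp only []
  rw [loop_closed, enum_fold, PySem.List.slice_to_neg_one, sum_dropLast]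
  ring
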